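-- pv_equiv track=rewrite | github.com/Raj-3200/RepoBuddy | backend/app/analysis/risk_surface.py | _is_data_path
-- ===== SOURCE A (Python) =====
-- def _is_data_path(path: str) -> bool:
--     p = "/" + path.lower().lstrip("/")
--     return any(
--         seg in p
--         for seg in (
--             "/models/",
--             "/schema/",
--             "/schemas/",
--             "/db/",
--             "/database/",
--             "/migrations/",
--             "/repositories/",
--             "/dao/",
--             "/orm/",
--             "/prisma/",
--             "/drizzle/",
--             "/backend/",
--         )
--     )
-- ===== SOURCE B (Python) =====
-- _DATA_NAMES = frozenset((
--     "models", "schema", "schemas", "db", "database", "migrations",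
--     "repositories", "dao", "orm", "prisma", "drizzle", "backend",
-- ))
--
--
-- def _is_data_path(path: str) -> bool:
--     # One pass over the path: collect each '/'-delimited segment and, when a
--     # closing '/' is seen, test the segment against the set of data names.
--     # The leading '/' that A prepends means the first segment counts too;
--     # the trailing segment (no closing slash) is never tested, as in A.
--     cur = []
--     for ch in path.lower().lstrip("/"):
--         if ch == "/":
--             if "".join(cur) in _DATA_NAMES:
--                 return True
--             cur = []
--         else:
--             cur.append(ch)
--     return False
-- ===== Notes on version B (the rewrite author's own statement) =====
-- stated objective: alternative
-- what changed: A scans the whole lowered path once for each of twelve slash-wrapped substrings; B makes a single left-to-right pass that accumulates each slash-delimited segment and tests the closed segment against a frozenset of bare names.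
import Mathlib
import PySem

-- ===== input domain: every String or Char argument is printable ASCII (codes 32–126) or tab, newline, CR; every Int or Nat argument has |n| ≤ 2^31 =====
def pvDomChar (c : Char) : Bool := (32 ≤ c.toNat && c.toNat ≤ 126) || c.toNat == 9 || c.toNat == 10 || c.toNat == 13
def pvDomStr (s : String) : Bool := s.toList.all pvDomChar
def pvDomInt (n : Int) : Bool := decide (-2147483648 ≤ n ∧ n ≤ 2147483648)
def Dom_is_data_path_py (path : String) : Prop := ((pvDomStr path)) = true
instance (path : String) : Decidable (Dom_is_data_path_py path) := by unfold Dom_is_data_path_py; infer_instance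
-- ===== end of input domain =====

-- B replaces A's twelve substring scans by one left-to-right pass that collects each
-- '/'-delimited segment and tests it against a set of bare names (alternative algorithm).

-- ===== PORT A =====
-- path.lstrip("/") strips exactly the leading '/' characters: List.dropWhile (· == '/') is exact here.
def is_data_path_py (path : String) : Bool :=
  let p : List Char := '/' :: (PySem.Chars.lower path.toList).dropWhile (· == '/')
  ["/models/".toList, "/schema/".toList, "/schemas/".toList, "/db/".toList,
   "/database/".toList, "/migrations/".toList, "/repositories/".toList, "/dao/".toList,
   "/orm/".toList, "/prisma/".toList, "/drizzle/".toList, "/backend/".toList].any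
    (fun seg => PySem.Chars.isIn seg p)

-- ===== PORT B =====
def pvDataNames : List (List Char) :=
  ["models".toList, "schema".toList, "schemas".toList, "db".toList,
   "database".toList, "migrations".toList, "repositories".toList, "dao".toList,
   "orm".toList, "prisma".toList, "drizzle".toList, "backend".toList]

-- the for-loop of Source B: cur is the segment collected since the last '/'
def pvAltLoop : List Char → List Char → Bool
  | [], _ => false
  | c :: rest, cur =>
      if c = '/' then
        if cur ∈ pvDataNames then true else pvAltLoop rest []
      else pvAltLoop rest (cur ++ [c])

def is_data_path_py_alt (path : String) : Bool :=
  pvAltLoop ((PySem.Chars.lower path.toList).dropWhile (· == '/')) []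

-- ===== PRECONDITION & SPEC =====
def Spec_is_data_path_py (path : String) (out : Bool) : Prop := out = is_data_path_py_alt path
instance (path : String) (out : Bool) : Decidable (Spec_is_data_path_py path out) := by unfold Spec_is_data_path_py; infer_instance

-- ===== CLAIM (what is proved, stated in full; the proofs are below) =====
def Claim_equal_is_data_path_py : Prop := ∀ (path : String), Dom_is_data_path_py path → Spec_is_data_path_py path (is_data_path_py path)

-- ===== LEMMAS AND PROOFS =====

lemma pv_no_slash : ∀ x ∈ pvDataNames, '/' ∉ x := by decide

-- a slash-free x followed by '/' is a prefix of cur ++ '/' :: rest iff x is exactly cur (cur slash-free)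
lemma pv_prefix_seg (x cur rest : List Char) (hx : '/' ∉ x) (hc : '/' ∉ cur) :
    (x ++ ['/']) <+: (cur ++ '/' :: rest) ↔ x = cur := by
  induction x generalizing cur with
  | nil =>
    cases cur with
    | nil => simp
    | cons c cur' =>
      simp only [List.nil_append, List.cons_append]
      constructor
      · intro h
        exact absurd (List.mem_cons.mpr (Or.inl (List.cons_prefix_cons.mp h).1)) hc
      · intro h; cases h
  | cons a x' ih =>
    have hane : a ≠ '/' := fun h => hx (List.mem_cons.mpr (Or.inl h.symm))
    have hx' : '/' ∉ x' := fun h => hx (List.mem_cons_of_mem _ h)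
    cases cur with
    | nil =>
      simp only [List.cons_append, List.nil_append]
      constructor
      · intro h
        exact absurd (List.cons_prefix_cons.mp h).1 hane
      · intro h; cases h
    | cons c cur' =>
      have hc' : '/' ∉ cur' := fun h => hc (List.mem_cons_of_mem _ h)
      simp only [List.cons_append, List.cons_prefix_cons]
      rw [ih cur' hx' hc']
      simp

lemma pv_prefix_no_slash (x cur : List Char) (hc : '/' ∉ cur) :
    ¬ (x ++ ['/']) <+: cur := by
  intro h
  exact hc (h.subset (by simp))

-- "/x/" occurs in '/'::t iff "x/" is a prefix of t or "/x/" occurs in t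
lemma pv_infix_cons_slash (x t : List Char) :
    (('/' :: (x ++ ['/'])) <:+: ('/' :: t)) ↔ ((x ++ ['/']) <+: t) ∨ (('/' :: (x ++ ['/'])) <:+: t) := by
  rw [List.infix_cons_iff, List.cons_prefix_cons]
  simp

-- invariant of Source B's loop: result ⟺ some data name occurs as a closed segment
lemma pvAltLoop_iff (t : List Char) (cur : List Char) (hc : '/' ∉ cur) :
    pvAltLoop t cur = true ↔
      ∃ x ∈ pvDataNames, ((x ++ ['/']) <+: (cur ++ t)) ∨ (('/' :: (x ++ ['/'])) <:+: t) := by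
  induction t generalizing cur with
  | nil =>
    simp only [pvAltLoop, List.append_nil]
    constructor
    · intro h; cases h
    · rintro ⟨x, hx, h | h⟩
      · exact absurd h (pv_prefix_no_slash x cur hc)
      · have := h.sublist.length_le; simp at this
  | cons c rest ih =>
    by_cases hcs : c = '/'
    · subst hcs
      have hred : pvAltLoop ('/' :: rest) cur
          = if cur ∈ pvDataNames then true else pvAltLoop rest [] := by
        simp [pvAltLoop]
      rw [hred]
      by_cases hmem : cur ∈ pvDataNames
      · rw [if_pos hmem]
        constructor
        · intro _
          exact ⟨cur, hmem, Or.inl ((pv_prefix_seg cur cur rest hc hc).mpr rfl)⟩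
        · intro _; rfl
      · rw [if_neg hmem, ih [] (by simp)]
        constructor
        · rintro ⟨x, hx, h | h⟩
          · exact ⟨x, hx, Or.inr ((pv_infix_cons_slash x rest).mpr (Or.inl (by simpa using h)))⟩
          · exact ⟨x, hx, Or.inr ((pv_infix_cons_slash x rest).mpr (Or.inr h))⟩
        · rintro ⟨x, hx, h | h⟩
          · rw [pv_prefix_seg x cur rest (pv_no_slash x hx) hc] at h
            subst h
            exact absurd hx hmem
          · rcases (pv_infix_cons_slash x rest).mp h with h' | h'
            · exact ⟨x, hx, Or.inl (by simpa using h')⟩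
            · exact ⟨x, hx, Or.inr h'⟩
    · have hred : pvAltLoop (c :: rest) cur = pvAltLoop rest (cur ++ [c]) := by
        simp [pvAltLoop, hcs]
      rw [hred, ih (cur ++ [c]) (by simp [hc, Ne.symm hcs])]
      constructor
      · rintro ⟨x, hx, h | h⟩
        · exact ⟨x, hx, Or.inl (by simpa using h)⟩
        · exact ⟨x, hx, Or.inr (h.trans (List.suffix_cons c rest).isInfix)⟩
      · rintro ⟨x, hx, h | h⟩
        · exact ⟨x, hx, Or.inl (by simpa using h)⟩
        · rcases List.infix_cons_iff.mp h with h' | h'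
          · rcases List.cons_prefix_cons.mp h' with ⟨h1, -⟩
            exact absurd h1.symm hcs
          · exact ⟨x, hx, Or.inr h'⟩

-- A's twelve wrapped literals are exactly the bare names wrapped in slashes
lemma pv_segs_eq :
    ["/models/".toList, "/schema/".toList, "/schemas/".toList, "/db/".toList,
     "/database/".toList, "/migrations/".toList, "/repositories/".toList, "/dao/".toList,
     "/orm/".toList, "/prisma/".toList, "/drizzle/".toList, "/backend/".toList]
      = pvDataNames.map (fun x => '/' :: (x ++ ['/'])) := by decide

-- ===== VERDICT (by name: the statement is the Claim_ definition above) =====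
theorem is_data_path_py_spec : Claim_equal_is_data_path_py := by
  intro path _
  show is_data_path_py path = is_data_path_py_alt path
  unfold is_data_path_py is_data_path_py_alt
  set t := (PySem.Chars.lower path.toList).dropWhile (· == '/') with ht
  rw [Bool.eq_iff_iff, List.any_eq_true, pvAltLoop_iff t [] (by simp), pv_segs_eq]
  simp only [List.mem_map]
  constructor
  · rintro ⟨seg, ⟨x, hx, rfl⟩, hinf⟩
    rcases (pv_infix_cons_slash x t).mp ((PySem.Chars.isIn_iff_infix _ _).mp hinf) with h | h
    · exact ⟨x, hx, Or.inl (by simpa using h)⟩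
    · exact ⟨x, hx, Or.inr h⟩
  · rintro ⟨x, hx, h | h⟩
    · exact ⟨_, ⟨x, hx, rfl⟩, (PySem.Chars.isIn_iff_infix _ _).mpr
        ((pv_infix_cons_slash x t).mpr (Or.inl (by simpa using h)))⟩
    · exact ⟨_, ⟨x, hx, rfl⟩, (PySem.Chars.isIn_iff_infix _ _).mpr
        ((pv_infix_cons_slash x t).mpr (Or.inr h))⟩
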